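-- pv_equiv track=rewrite | github.com/konszymanski/leetcode-dataset | obfuscated_solutions/python/1611-minimum-one-bit-operations-to-make-integers-zero/solution_3_l0_l1_l3.py | minimumOneBitOperations
-- ===== SOURCE A (Python) =====
-- def minimumOneBitOperations(n: int) -> int:
--     v1_754 = 0
--     if len('abc') == 3:
--         v2_214 = 0
--     if len('abc') == 3:
--         v3_125 = 1
--     while v3_125 <= n:
--         if n & v3_125:
--             if len('abc') == 3:
--                 v1_754 = (1 << v2_214 + 1) - 1 - v1_754
--         v3_125 <<= 1
--         v2_214 += 1
--     return v1_754
-- ===== SOURCE B (Python) =====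
-- def minimumOneBitOperations(n: int) -> int:
--     # Top-down: peel the highest set bit using the Gray-code reflection
--     # identity f(2^k + r) = 2^(k+1) - 1 - f(r) for r < 2^k.
--     if n <= 0:
--         return 0
--     k = n.bit_length() - 1
--     return (1 << (k + 1)) - 1 - minimumOneBitOperations(n - (1 << k))
-- ===== Notes on version B (the rewrite author's own statement) =====
-- stated objective: alternative
-- what changed: Replaces A's bottom-up loop over all bit positions (with the reflection recurrence applied LSB-to-MSB) by a top-down recursion that peels the highest set bit using the Gray-code identity f(2^k + r) = 2^(k+1) - 1 - f(r).
import Mathlib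
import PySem

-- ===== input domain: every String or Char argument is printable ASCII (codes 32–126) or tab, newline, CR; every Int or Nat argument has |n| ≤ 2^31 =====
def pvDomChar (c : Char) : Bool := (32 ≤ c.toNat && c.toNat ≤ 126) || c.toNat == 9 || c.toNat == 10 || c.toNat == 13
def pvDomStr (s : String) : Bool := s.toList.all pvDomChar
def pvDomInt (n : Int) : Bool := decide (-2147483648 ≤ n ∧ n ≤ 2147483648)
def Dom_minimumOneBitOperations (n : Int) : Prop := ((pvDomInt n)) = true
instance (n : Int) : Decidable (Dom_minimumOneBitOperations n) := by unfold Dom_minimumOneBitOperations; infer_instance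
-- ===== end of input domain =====

-- B replaces A's bottom-up loop over all bit positions by a top-down recursion
-- peeling the highest set bit via the reflection identity f(2^k+r) = 2^(k+1)-1-f(r).

-- ===== PORT A =====
-- A's while loop; state (v1_754 = ans, v2_214 = pos, v3_125 = v3).  pos and v3 are
-- nonnegative Python ints throughout, tracked as Nat.  The `1 ≤ v3` conjunct is a
-- totality guard only (v3 starts at 1 and doubles, so it always holds).
def pvALoop (n : Int) (ans : Int) (pos : Nat) (v3 : Nat) : Int :=
  if 1 ≤ v3 ∧ (v3 : Int) ≤ n then
    pvALoop n (if Int.land n (v3 : Int) ≠ 0 then (1 : Int) <<< (pos + 1) - 1 - ans else ans)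
      (pos + 1) (v3 <<< 1)
  else ans
termination_by (n + 1 - v3).toNat
decreasing_by
  rename_i h
  simp only [Nat.shiftLeft_eq]
  push_cast
  omega

def minimumOneBitOperations (n : Int) : Int := pvALoop n 0 0 1

-- ===== PORT B =====
-- transliteration of Source B: n.bit_length() - 1 for n > 0 is n.toNat.log2,
-- and 1 << k (k ≥ 0) is (1 : Int) <<< k.
def minimumOneBitOperations_alt (n : Int) : Int :=
  if n ≤ 0 then 0
  else
    let k := n.toNat.log2
    (1 : Int) <<< (k + 1) - 1 - minimumOneBitOperations_alt (n - (1 : Int) <<< k)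
termination_by n.toNat
decreasing_by
  rename_i h
  have h1 : 2 ^ n.toNat.log2 ≤ n.toNat := Nat.log2_self_le (by omega)
  have h2 : (1 : Int) <<< n.toNat.log2 = ((2 ^ n.toNat.log2 : Nat) : Int) := by
    rw [Int.shiftLeft_eq]; push_cast; ring
  rw [h2]
  have h3 : (1 : Nat) ≤ 2 ^ n.toNat.log2 := Nat.one_le_two_pow
  omega

-- ===== PRECONDITION & SPEC =====
def Spec_minimumOneBitOperations (n : Int) (out : Int) : Prop := out = minimumOneBitOperations_alt n
instance (n : Int) (out : Int) : Decidable (Spec_minimumOneBitOperations n out) := by unfold Spec_minimumOneBitOperations; infer_instance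

-- ===== CLAIM (what is proved, stated in full; the proofs are below) =====
def Claim_equal_minimumOneBitOperations : Prop := ∀ (n : Int), Dom_minimumOneBitOperations n → Spec_minimumOneBitOperations n (minimumOneBitOperations n)

-- ===== LEMMAS AND PROOFS =====

-- Nat model of A's loop: processes the remaining bits m = n >> pos, LSB first.
def pvAOf (m : Nat) (ans : Int) (pos : Nat) : Int :=
  if m = 0 then ans
  else pvAOf (m / 2) (if m % 2 = 1 then (2 : Int) ^ (pos + 1) - 1 - ans else ans) (pos + 1)
termination_by m
decreasing_by omega

lemma pvAOf_zero (ans : Int) (pos : Nat) : pvAOf 0 ans pos = ans := by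
  rw [pvAOf]; simp

lemma pvALoop_eq_pvAOf (M : Nat) : ∀ (N : Nat) (ans : Int) (pos : Nat),
    N / 2 ^ pos = M → pvALoop (N : Int) ans pos (2 ^ pos) = pvAOf M ans pos := by
  induction M using Nat.strong_induction_on with
  | _ M ih =>
    intro N ans pos hM
    rcases Nat.eq_zero_or_pos M with h0 | hpos
    · subst h0
      have hlt : N < 2 ^ pos := by
        by_contra hc
        have h1 : 1 ≤ N / 2 ^ pos :=
          (Nat.one_le_div_iff (Nat.two_pow_pos pos)).mpr (by omega)
        omega
      rw [pvALoop, if_neg, pvAOf_zero]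
      intro hc
      have : ((2 ^ pos : Nat) : Int) ≤ (N : Int) := hc.2
      have : (2 ^ pos : Nat) ≤ N := by exact_mod_cast this
      omega
    · have hle : 2 ^ pos ≤ N := by
        by_contra hc
        rw [Nat.div_eq_of_lt (by omega)] at hM
        omega
      have hcond : (1 ≤ 2 ^ pos ∧ ((2 ^ pos : Nat) : Int) ≤ (N : Int)) :=
        ⟨Nat.one_le_two_pow, by exact_mod_cast hle⟩
      rw [pvALoop, if_pos hcond]
      -- the branch condition: n & (1 << pos) ≠ 0  ↔  (N / 2^pos) % 2 = 1
      have hland : Int.land (N : Int) ((2 ^ pos : Nat) : Int) = ((N &&& 2 ^ pos : Nat) : Int) := rfl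
      have hand : N &&& 2 ^ pos = (N.testBit pos).toNat * 2 ^ pos := Nat.and_two_pow N pos
      have htb : N.testBit pos = decide (M % 2 = 1) := by
        rw [Nat.testBit_eq_decide_div_mod_eq, hM]
      have hbit : (Int.land (N : Int) ((2 ^ pos : Nat) : Int) ≠ 0) ↔ M % 2 = 1 := by
        rw [hland, hand, htb]
        rcases Nat.mod_two_eq_zero_or_one M with he | ho
        · simp [he]
        · have hp2 : (0 : Int) < ((2 ^ pos : Nat) : Int) := by exact_mod_cast Nat.two_pow_pos pos
          simp only [ho, decide_true, Bool.toNat_true, one_mul]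
          constructor
          · intro _; trivial
          · intro _; omega
      have hshift : ((2 : Nat) ^ pos) <<< 1 = 2 ^ (pos + 1) := by
        rw [Nat.shiftLeft_eq]; ring
      have hpow : (1 : Int) <<< (pos + 1) = (2 : Int) ^ (pos + 1) := by
        rw [Int.shiftLeft_eq]; ring
      have hdiv : N / 2 ^ (pos + 1) = M / 2 := by
        rw [pow_succ, ← Nat.div_div_eq_div_mul, hM]
      rw [hshift, hpow]
      rw [ih (M / 2) (by omega) N _ (pos + 1) hdiv]
      conv_rhs => rw [pvAOf]
      rw [if_neg (show ¬ M = 0 by omega)]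
      simp only [hbit]

-- Peeling the top bit of the processed block: for 2^j ≤ m < 2^(j+1),
-- pvAOf m ans pos = 2^(pos+j+1) - 1 - pvAOf (m - 2^j) ans pos.
lemma pvAOf_top (j : Nat) : ∀ (m : Nat) (ans : Int) (pos : Nat),
    2 ^ j ≤ m → m < 2 ^ (j + 1) → pvAOf m ans pos = (2 : Int) ^ (pos + j + 1) - 1 - pvAOf (m - 2 ^ j) ans pos := by
  induction j with
  | zero =>
    intro m ans pos hlo hhi
    have hm : m = 1 := by norm_num at hlo hhi; omega
    subst hm
    rw [pvAOf]
    norm_num [pvAOf_zero]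
  | succ j ih =>
    intro m ans pos hlo hhi
    have h2p : 0 < 2 ^ (j + 1) := Nat.two_pow_pos (j + 1)
    have hm0 : m ≠ 0 := by omega
    have heven : 2 ^ (j + 1) % 2 = 0 := by rw [pow_succ, Nat.mul_mod_left]
    have hmod : m % 2 = (m - 2 ^ (j + 1)) % 2 := by omega
    have hdiv2 : m / 2 - 2 ^ j = (m - 2 ^ (j + 1)) / 2 := by
      rw [pow_succ] at hlo ⊢
      omega
    have hlo' : 2 ^ j ≤ m / 2 := by rw [pow_succ] at hlo; omega
    have hhi' : m / 2 < 2 ^ (j + 1) := by rw [pow_succ] at hhi; omega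
    rw [pvAOf, if_neg hm0]
    rw [ih (m / 2) _ (pos + 1) hlo' hhi']
    have hexp : pos + 1 + j + 1 = pos + (j + 1) + 1 := by ring
    rw [hexp]
    congr 1
    -- remaining: pvAOf (m/2 - 2^j) ans' (pos+1) = pvAOf (m - 2^(j+1)) ans pos
    rcases Nat.eq_zero_or_pos (m - 2 ^ (j + 1)) with hz | hp
    · -- m = 2^(j+1): m is even, both sides reduce to ans
      have hmev : m % 2 = 0 := by omega
      have hz2 : m / 2 - 2 ^ j = 0 := by omega
      rw [hz, hz2, pvAOf_zero, pvAOf_zero, if_neg (show ¬ m % 2 = 1 by omega)]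
    · conv_rhs => rw [pvAOf]
      rw [if_neg (show ¬ m - 2 ^ (j + 1) = 0 by omega), ← hdiv2, ← hmod]

-- Main: A = B on every Int (both return 0 for n ≤ 0; for n > 0, strong induction
-- on n.toNat using the two lemmas above).
lemma pvTotal (N : Nat) : ∀ (n : Int), n.toNat = N → minimumOneBitOperations n = minimumOneBitOperations_alt n := by
  induction N using Nat.strong_induction_on with
  | _ N ih =>
    intro n hN
    by_cases hneg : n ≤ 0
    · rw [minimumOneBitOperations, pvALoop, if_neg (fun hc => absurd hc.2 (by omega)),
        minimumOneBitOperations_alt, if_pos hneg]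
    · rw [not_le] at hneg
      have hN1 : 1 ≤ N := by omega
      have hcastn : n = (N : Int) := by omega
      set j := N.log2 with hj
      have hlo : 2 ^ j ≤ N := Nat.log2_self_le (by omega)
      have hhi : N < 2 ^ (j + 1) := Nat.lt_log2_self
      -- A n = pvAOf N 0 0
      have hA : minimumOneBitOperations n = pvAOf N 0 0 := by
        rw [minimumOneBitOperations, hcastn]
        have := pvALoop_eq_pvAOf N N 0 0 (by simp)
        simpa using this
      -- peel the top bit
      have hA2 : pvAOf N 0 0 = (2 : Int) ^ (j + 1) - 1 - pvAOf (N - 2 ^ j) 0 0 := by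
        have := pvAOf_top j N 0 0 hlo hhi
        simpa using this
      -- the residue is again A at a smaller argument
      have hres : pvAOf (N - 2 ^ j) 0 0 = minimumOneBitOperations ((N - 2 ^ j : Nat) : Int) := by
        rw [minimumOneBitOperations]
        have := pvALoop_eq_pvAOf (N - 2 ^ j) (N - 2 ^ j) 0 0 (by simp)
        simpa using this.symm
      have hless : N - 2 ^ j < N := by
        have : (1:Nat) ≤ 2 ^ j := Nat.one_le_two_pow
        omega
      have hIH : minimumOneBitOperations ((N - 2 ^ j : Nat) : Int) = minimumOneBitOperations_alt ((N - 2 ^ j : Nat) : Int) := by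
        exact ih (N - 2 ^ j) hless _ (by simp)
      -- unfold B one step
      have hBpow : (1 : Int) <<< (j + 1) = (2 : Int) ^ (j + 1) := by rw [Int.shiftLeft_eq]; ring
      have hBpow2 : (1 : Int) <<< j = (2 : Int) ^ j := by rw [Int.shiftLeft_eq]; ring
      have hBarg : n - (1 : Int) <<< j = ((N - 2 ^ j : Nat) : Int) := by
        rw [hBpow2, hcastn]
        have : ((2:Nat) ^ j : Int) = (2:Int) ^ j := by push_cast; ring
        omega
      have hB : minimumOneBitOperations_alt n = (2 : Int) ^ (j + 1) - 1 - minimumOneBitOperations_alt ((N - 2 ^ j : Nat) : Int) := by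
        rw [minimumOneBitOperations_alt, if_neg (by omega)]
        simp only [← hj, hN, hBpow, hBarg]
      rw [hA, hA2, hres, hIH, hB]

-- ===== VERDICT (by name: the statement is the Claim_ definition above) =====
theorem minimumOneBitOperations_spec : Claim_equal_minimumOneBitOperations := by
  intro n _
  unfold Spec_minimumOneBitOperations
  exact (pvTotal n.toNat n rfl)
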